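-- pv_equiv track=rewrite | github.com/d3vdebug/codedex_march_challenge_2026 | Day_24/opening_day.py | streak_counter
-- ===== SOURCE A (Python) =====
-- def streak_counter(games):
--   # Write code below 💖
--   max_win = 0
--   cur_win = 0
--
--   for game in games:
--     if game == "W":
--       cur_win += 1
--     elif game == "R":
--       cur_win += 0
--     else:
--       cur_win = 0
--
--     max_win = max(max_win, cur_win)
--
--   return max_win
-- ===== SOURCE B (Python) =====
-- def streak_counter(games):
--     # group-then-reduce: partition games into segments broken by losses,
--     # then take the max win-count over segments (0 for none)
--     segments = []
--     cur = []
--     for g in games: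
--         if g == "W" or g == "R":
--             cur.append(g)
--         else:
--             segments.append(cur)
--             cur = []
--     segments.append(cur)
--     return max(sum(1 for x in seg if x == "W") for seg in segments)
-- ===== Notes on version B (the rewrite author's own statement) =====
-- stated objective: alternative
-- what changed: Replaces A's fused running-counter/max scan with a group-then-reduce decomposition: first partition the games into segments at each loss, then map segments to their W-counts and take the maximum.
import Mathlib
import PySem

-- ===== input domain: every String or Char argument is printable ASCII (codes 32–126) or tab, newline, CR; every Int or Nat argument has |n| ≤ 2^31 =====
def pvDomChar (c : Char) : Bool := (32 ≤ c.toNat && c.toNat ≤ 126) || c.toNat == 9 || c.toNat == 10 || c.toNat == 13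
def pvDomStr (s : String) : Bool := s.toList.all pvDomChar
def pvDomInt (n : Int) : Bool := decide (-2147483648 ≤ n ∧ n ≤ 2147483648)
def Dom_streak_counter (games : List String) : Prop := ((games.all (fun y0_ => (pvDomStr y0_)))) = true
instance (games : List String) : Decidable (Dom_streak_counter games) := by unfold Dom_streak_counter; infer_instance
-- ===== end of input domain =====

-- B replaces A's fused running-counter/max scan with a group-then-reduce decomposition
-- (partition into loss-broken segments, then max of per-segment W-counts); same O(n) cost.


-- ===== PORT A =====
-- one loop, state (max_win, cur_win)
def streak_counter (games : List String) : Int :=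
  (games.foldl (fun (p : Int × Int) game =>
      let cur : Int := if game == "W" then p.2 + 1 else if game == "R" then p.2 else 0
      (max p.1 cur, cur)) (0, 0)).1

-- ===== PORT B =====
-- sum(1 for x in seg if x == "W")
def pvCountW (seg : List String) : Int :=
  seg.foldl (fun a x => if x == "W" then a + 1 else a) 0

-- the segment-building loop: state (segments, cur)
def pvSegStep (st : List (List String) × List String) (g : String) : List (List String) × List String :=
  if g == "W" || g == "R" then (st.1, st.2 ++ [g]) else (st.1 ++ [st.2], [])

def streak_counter_alt (games : List String) : Int :=
  let st := games.foldl pvSegStep ([], [])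
  let segments := st.1 ++ [st.2]
  (segments.map pvCountW).foldl max 0

-- ===== PRECONDITION & SPEC =====
def Spec_streak_counter (games : List String) (out : Int) : Prop := out = streak_counter_alt games
instance (games : List String) (out : Int) : Decidable (Spec_streak_counter games out) := by unfold Spec_streak_counter; infer_instance

-- ===== CLAIM (what is proved, stated in full; the proofs are below) =====
def Claim_equal_streak_counter : Prop := ∀ (games : List String), Dom_streak_counter games → Spec_streak_counter games (streak_counter games)

-- ===== LEMMAS AND PROOFS =====

-- B's final answer as a function of an intermediate loop state
def pvM (segs : List (List String)) (cur : List String) : Int :=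
  ((segs ++ [cur]).map pvCountW).foldl max 0

lemma pvM_eq (segs : List (List String)) (cur : List String) :
    pvM segs cur = max ((segs.map pvCountW).foldl max 0) (pvCountW cur) := by
  simp [pvM, List.foldl_append]

lemma pvCountW_append_single (l : List String) (g : String) :
    pvCountW (l ++ [g]) = if g == "W" then pvCountW l + 1 else pvCountW l := by
  simp [pvCountW, List.foldl_append]

-- A's loop, started at the state corresponding to B's state (segs, cur),
-- tracks B's segment loop exactly.
lemma loop_eq (gs : List String) : ∀ (segs : List (List String)) (cur : List String),
    gs.foldl (fun (p : Int × Int) game =>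
      let c : Int := if game == "W" then p.2 + 1 else if game == "R" then p.2 else 0
      (max p.1 c, c)) (pvM segs cur, pvCountW cur)
    = (fun st => (pvM st.1 st.2, pvCountW st.2)) (gs.foldl pvSegStep (segs, cur)) := by
  induction gs with
  | nil => intro segs cur; rfl
  | cons g gs ih =>
    intro segs cur
    simp only [List.foldl_cons]
    by_cases hW : g == "W"
    · have h1 : pvCountW (cur ++ [g]) = pvCountW cur + 1 := by
        simp [pvCountW_append_single, hW]
      have h2 : pvM segs (cur ++ [g]) = max (pvM segs cur) (pvCountW cur + 1) := by
        simp only [pvM_eq, h1]; omega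
      have h := ih segs (cur ++ [g])
      rw [h1, h2] at h
      simpa [pvSegStep, hW] using h
    · by_cases hR : g == "R"
      · have h1 : pvCountW (cur ++ [g]) = pvCountW cur := by
          simp [pvCountW_append_single, hW]
        have h2 : pvM segs (cur ++ [g]) = max (pvM segs cur) (pvCountW cur) := by
          simp only [pvM_eq, h1]; omega
        have h := ih segs (cur ++ [g])
        rw [h1, h2] at h
        simpa [pvSegStep, hW, hR] using h
      · have h2 : pvM (segs ++ [cur]) [] = max (pvM segs cur) 0 := by
          simp only [pvM_eq, List.map_append, List.map_cons, List.map_nil,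
            List.foldl_append, List.foldl_cons, List.foldl_nil]
          have hz : pvCountW ([] : List String) = 0 := rfl
          rw [hz]
        have h := ih (segs ++ [cur]) []
        rw [h2] at h
        have hz : pvCountW ([] : List String) = 0 := rfl
        rw [hz] at h
        simpa [pvSegStep, hW, hR] using h

-- ===== VERDICT (by name: the statement is the Claim_ definition above) =====
theorem streak_counter_spec : Claim_equal_streak_counter := by
  intro games _
  show streak_counter games = streak_counter_alt games
  exact congrArg Prod.fst (loop_eq games [] [])
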